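-- pv_equiv track=rewrite | github.com/ClemensWec/Sparfuchs | app/services/category_search.py | _has_word_match
-- ===== SOURCE A (Python) =====
-- def _has_word_match(text: str, query: str) -> bool:
--     """Check if query appears in text at word boundaries.
--
--     'reis' matches 'basmati reis' but NOT 'reisegepäck'.
--     Handles multi-word queries: 'chips paprika' in 'chips paprika style'.
--     Checks ALL occurrences, not just the first.
--     """
--     if query not in text:
--         return False
--     _BOUNDARY = frozenset(" -&/,")
--     start = 0
--     while True:
--         idx = text.find(query, start)
--         if idx == -1:
--             return False
--         end = idx + len(query)
--         left_ok = idx == 0 or text[idx - 1] in _BOUNDARY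
--         right_ok = end >= len(text) or text[end] in _BOUNDARY
--         if left_ok and right_ok:
--             return True
--         start = idx + 1
-- ===== SOURCE B (Python) =====
-- def _has_word_match(text: str, query: str) -> bool:
--     """Enumerate the word-start positions (0 and every position after a boundary
--     char) and test the query plus its right boundary at each of them."""
--     _BOUNDARY = " -&/,"
--     n = len(text)
--     starts = [0] + [j + 1 for j in range(n) if text[j] in _BOUNDARY]
--     return any(
--         text.startswith(query, i)
--         and (i + len(query) >= n or text[i + len(query)] in _BOUNDARY)
--         for i in starts
--     )
-- ===== Notes on version B (the rewrite author's own statement) =====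
-- stated objective: alternative
-- what changed: A scans successive find() occurrences of the query and tests both boundaries at each; B instead enumerates the word-start positions (0 and each position right after a boundary character) and tests startswith plus the right boundary there, so the left-boundary test disappears into the candidate set.
import Mathlib
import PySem

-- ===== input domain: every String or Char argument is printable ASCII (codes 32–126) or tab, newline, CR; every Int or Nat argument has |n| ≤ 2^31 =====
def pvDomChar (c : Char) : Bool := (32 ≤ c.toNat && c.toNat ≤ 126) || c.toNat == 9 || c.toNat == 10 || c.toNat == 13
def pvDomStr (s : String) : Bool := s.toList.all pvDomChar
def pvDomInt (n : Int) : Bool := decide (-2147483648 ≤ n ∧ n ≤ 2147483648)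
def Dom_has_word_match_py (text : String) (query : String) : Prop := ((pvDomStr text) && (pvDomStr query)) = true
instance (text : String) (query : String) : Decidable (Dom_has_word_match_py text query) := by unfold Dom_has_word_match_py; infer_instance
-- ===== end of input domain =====

-- B replaces A's find/advance loop over query occurrences by a scan of the word-start
-- positions (0 and each position after a boundary char); alternative algorithm, not claimed faster.

-- ===== PORT A =====
-- the frozenset " -&/," membership test
def pvBoundary (c : Char) : Bool := c == ' ' || c == '-' || c == '&' || c == '/' || c == ','

-- A's `while True` loop; fuel only makes the recursion total (start grows by ≥ 1 each
-- round and the loop ends once start exceeds len(text), so length+2 fuel is never exhausted).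
-- text[idx-1] / text[end] are ported as pyGet? …‍.any: both accesses are guarded by the
-- short-circuit `or`, so the none branch is only reached when the `or` is already true.
def pvLoopA (s q : List Char) (start fuel : Nat) : Bool :=
  match fuel with
  | 0 => false
  | fuel + 1 =>
    let idx : Int := PySem.Chars.findFrom s q (start : Int) none
    if idx = -1 then false
    else
      let i := idx.toNat
      let e := i + q.length
      let leftOk := decide (i = 0) || (PySem.List.pyGet? s ((i : Int) - 1)).any pvBoundary
      let rightOk := decide (s.length ≤ e) || (PySem.List.pyGet? s ((e : Nat) : Int)).any pvBoundary
      if leftOk && rightOk then true else pvLoopA s q (i + 1) fuel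

def has_word_match_py (text : String) (query : String) : Bool :=
  if PySem.Str.isIn query text = false then false
  else pvLoopA text.toList query.toList 0 (text.toList.length + 2)

-- ===== PORT B =====
-- starts = [0] + [j + 1 for j in range(n) if text[j] in _BOUNDARY]
def pvStarts (s : List Char) : List Nat :=
  0 :: ((List.range s.length).filter (fun j => (PySem.List.pyGet? s ((j : Nat) : Int)).any pvBoundary)).map (· + 1)

-- text.startswith(query, i) with 0 ≤ i ≤ len(text) is exactly: query is a prefix of text[i:]
def has_word_match_py_alt (text : String) (query : String) : Bool :=
  let s := text.toList
  let q := query.toList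
  (pvStarts s).any (fun i =>
    PySem.Chars.startswith (s.drop i) q
    && (decide (s.length ≤ i + q.length) || (PySem.List.pyGet? s (((i + q.length : Nat)) : Int)).any pvBoundary))

-- ===== PRECONDITION & SPEC =====
def Spec_has_word_match_py (text : String) (query : String) (out : Bool) : Prop := out = has_word_match_py_alt text query
instance (text : String) (query : String) (out : Bool) : Decidable (Spec_has_word_match_py text query out) := by unfold Spec_has_word_match_py; infer_instance

-- ===== CLAIM (what is proved, stated in full; the proofs are below) =====
def Claim_equal_has_word_match_py : Prop := ∀ (text : String) (query : String), Dom_has_word_match_py text query → Spec_has_word_match_py text query (has_word_match_py text query)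

-- ===== LEMMAS AND PROOFS =====

-- "the query matches at position i with both word boundaries" — the condition both ports decide
def pvGoodA (s q : List Char) (i : Nat) : Bool :=
  decide (q <+: s.drop i)
  && ((decide (i = 0) || (PySem.List.pyGet? s ((i : Int) - 1)).any pvBoundary)
  && (decide (s.length ≤ i + q.length) || (PySem.List.pyGet? s (((i + q.length : Nat)) : Int)).any pvBoundary))

lemma pvGoodA_prefix (s q : List Char) (i : Nat) (h : pvGoodA s q i = true) :
    q <+: s.drop i := by
  unfold pvGoodA at h
  simp only [Bool.and_eq_true, decide_eq_true_eq] at h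
  exact h.1

lemma pvGoodA_le (s q : List Char) (i : Nat) (h : pvGoodA s q i = true) :
    i + q.length ≤ s.length := by
  have hpre := pvGoodA_prefix s q i h
  unfold pvGoodA at h
  simp only [Bool.and_eq_true, decide_eq_true_eq, Bool.or_eq_true] at h
  obtain ⟨-, hleft, -⟩ := h
  by_cases hi : i ≤ s.length
  · have hlen := hpre.length_le
    rw [List.length_drop] at hlen
    omega
  · exfalso
    have hdrop : s.drop i = [] := List.drop_eq_nil_of_le (by omega)
    rw [hdrop] at hpre
    have hq : q = [] := List.prefix_nil.mp hpre
    rcases hleft with h0 | hget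
    · omega
    · have hcast : (i : Int) - 1 = ((i - 1 : Nat) : Int) := by omega
      rw [hcast, PySem.List.pyGet?_natCast, List.getElem?_eq_none (by omega)] at hget
      simp at hget

lemma pvMem_starts (s : List Char) (i : Nat) :
    i ∈ pvStarts s ↔ (decide (i = 0) || (PySem.List.pyGet? s ((i : Int) - 1)).any pvBoundary) = true := by
  unfold pvStarts
  simp only [List.mem_cons, List.mem_map, List.mem_filter, List.mem_range]
  constructor
  · rintro (rfl | ⟨j, ⟨hj, hp⟩, rfl⟩)
    · simp
    · rw [Bool.or_eq_true]
      right
      have hcast : ((j + 1 : Nat) : Int) - 1 = ((j : Nat) : Int) := by push_cast; ring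
      rw [hcast]
      exact hp
  · intro h
    by_cases hi : i = 0
    · left; exact hi
    · right
      rw [Bool.or_eq_true, decide_eq_true_eq] at h
      rcases h with h0 | hget
      · exact absurd h0 hi
      · have hcast : (i : Int) - 1 = ((i - 1 : Nat) : Int) := by omega
        rw [hcast, PySem.List.pyGet?_natCast] at hget
        refine ⟨i - 1, ⟨?_, ?_⟩, by omega⟩
        · by_contra hlen
          rw [List.getElem?_eq_none (by omega)] at hget
          simp at hget
        · rw [PySem.List.pyGet?_natCast]
          exact hget

lemma pvB_iff (s q : List Char) :
    ((pvStarts s).any (fun i =>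
      PySem.Chars.startswith (s.drop i) q
      && (decide (s.length ≤ i + q.length) || (PySem.List.pyGet? s (((i + q.length : Nat)) : Int)).any pvBoundary)) = true)
    ↔ ∃ i, pvGoodA s q i = true := by
  rw [List.any_eq_true]
  constructor
  · rintro ⟨i, hmem, hp⟩
    simp only [Bool.and_eq_true] at hp
    obtain ⟨hsw, hr⟩ := hp
    refine ⟨i, ?_⟩
    unfold pvGoodA
    simp only [Bool.and_eq_true]
    exact ⟨by rw [decide_eq_true_eq]; exact (PySem.Chars.startswith_iff _ _).mp hsw,
           (pvMem_starts s i).mp hmem, hr⟩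
  · rintro ⟨i, hg⟩
    have hg' := hg
    unfold pvGoodA at hg'
    simp only [Bool.and_eq_true] at hg'
    obtain ⟨hpre, hleft, hr⟩ := hg'
    refine ⟨i, (pvMem_starts s i).mpr hleft, ?_⟩
    simp only [Bool.and_eq_true]
    exact ⟨(PySem.Chars.startswith_iff _ _).mpr (by rw [decide_eq_true_eq] at hpre; exact hpre), hr⟩

lemma pvFindFrom_gt (s q : List Char) (k : Nat) (h : s.length < k) :
    PySem.Chars.findFrom s q (k : Int) none = -1 := by
  have h1 : ¬((k : Int) < 0) := by omega
  have h2 : ((s.length : Int)) < (k : Int) := by exact_mod_cast h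
  simp [PySem.Chars.findFrom, h1, h2]

lemma pvLoopA_iff (s q : List Char) (fuel start : Nat)
    (hs : start ≤ s.length + 1) (hf : s.length + 2 ≤ fuel + start) :
    (pvLoopA s q start fuel = true) ↔ ∃ i, start ≤ i ∧ pvGoodA s q i = true := by
  induction fuel generalizing start with
  | zero => omega
  | succ fuel ih =>
    by_cases hst : start ≤ s.length
    · by_cases hidx : PySem.Chars.findFrom s q (start : Int) none = -1
      · have hstep : pvLoopA s q start (fuel + 1) = false := by
          show (if PySem.Chars.findFrom s q (start : Int) none = -1 then false else _) = false
          rw [if_pos hidx]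
        rw [hstep]
        apply iff_of_false (by simp)
        rintro ⟨i, hi, hg⟩
        have hpre := pvGoodA_prefix s q i hg
        have hnin := (PySem.Chars.findFrom_natCast_eq_neg_one_iff s q start hst).mp hidx
        apply hnin
        have hdd : (s.drop start).drop (i - start) = s.drop i := by
          rw [List.drop_drop]
          congr 1
          omega
        have : q <+: (s.drop start).drop (i - start) := hdd ▸ hpre
        exact (PySem.Chars.isIn_iff_infix _ _).mp
          ((PySem.Chars.exists_prefix_drop_iff_isIn _ _).mp ⟨i - start, this⟩)
      · obtain ⟨hge, hpre, hmin⟩ := PySem.Chars.findFrom_natCast_spec s q start hst hidx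
        have hfnn : 0 ≤ PySem.Chars.findFrom s q (start : Int) none :=
          le_trans (Int.natCast_nonneg start) hge
        have hsj : start ≤ (PySem.Chars.findFrom s q (start : Int) none).toNat := by omega
        have hjle : (PySem.Chars.findFrom s q (start : Int) none).toNat ≤ s.length := by
          by_cases hq : q = []
          · subst hq
            by_contra hlt
            exact hmin start le_rfl (by omega) (List.nil_prefix)
          · have h1 : 1 ≤ q.length := List.length_pos_iff.mpr hq
            have h2 := hpre.length_le
            rw [List.length_drop] at h2
            omega
        set j := (PySem.Chars.findFrom s q (start : Int) none).toNat with hjdef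
        have hstep : pvLoopA s q start (fuel + 1) =
            (if ((decide (j = 0) || (PySem.List.pyGet? s ((j : Int) - 1)).any pvBoundary)
              && (decide (s.length ≤ j + q.length) || (PySem.List.pyGet? s (((j + q.length : Nat)) : Int)).any pvBoundary)) = true
             then true else pvLoopA s q (j + 1) fuel) := by
          show (if PySem.Chars.findFrom s q (start : Int) none = -1 then false else _) = _
          rw [if_neg hidx]
        have hgj : pvGoodA s q j =
            ((decide (j = 0) || (PySem.List.pyGet? s ((j : Int) - 1)).any pvBoundary)
              && (decide (s.length ≤ j + q.length) || (PySem.List.pyGet? s (((j + q.length : Nat)) : Int)).any pvBoundary)) := by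
          unfold pvGoodA
          rw [decide_eq_true hpre, Bool.true_and]
        rw [hstep]
        by_cases hc : ((decide (j = 0) || (PySem.List.pyGet? s ((j : Int) - 1)).any pvBoundary)
              && (decide (s.length ≤ j + q.length) || (PySem.List.pyGet? s (((j + q.length : Nat)) : Int)).any pvBoundary)) = true
        · rw [if_pos hc]
          exact iff_of_true rfl ⟨j, hsj, by rw [hgj]; exact hc⟩
        · rw [if_neg hc]
          rw [ih (j + 1) (by omega) (by omega)]
          constructor
          · rintro ⟨i, hi, hg⟩
            exact ⟨i, by omega, hg⟩
          · rintro ⟨i, hi, hg⟩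
            refine ⟨i, ?_, hg⟩
            by_contra hlt
            rcases Nat.lt_or_ge i j with hij | hij
            · exact hmin i hi hij (pvGoodA_prefix s q i hg)
            · have hij' : i = j := by omega
              rw [hij', hgj] at hg
              exact hc hg
    · have hstart : s.length < start := by omega
      have hidx := pvFindFrom_gt s q start hstart
      have hstep : pvLoopA s q start (fuel + 1) = false := by
        show (if PySem.Chars.findFrom s q (start : Int) none = -1 then false else _) = false
        rw [if_pos hidx]
      rw [hstep]
      apply iff_of_false (by simp)
      rintro ⟨i, hi, hg⟩
      have := pvGoodA_le s q i hg
      omega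

lemma pvKey (text query : String) :
    has_word_match_py text query = has_word_match_py_alt text query := by
  have halt : has_word_match_py_alt text query = true ↔
      ∃ i, pvGoodA text.toList query.toList i = true := pvB_iff text.toList query.toList
  unfold has_word_match_py
  by_cases hin : PySem.Str.isIn query text = false
  · rw [if_pos hin]
    have hno : ¬ ∃ i, pvGoodA text.toList query.toList i = true := by
      rintro ⟨i, hg⟩
      have hpre := pvGoodA_prefix text.toList query.toList i hg
      have hisin : PySem.Chars.isIn query.toList text.toList = true :=
        (PySem.Chars.exists_prefix_drop_iff_isIn _ _).mp ⟨i, hpre⟩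
      rw [show PySem.Str.isIn query text = PySem.Chars.isIn query.toList text.toList from
        PySem.Str.isIn_eq query text] at hin
      rw [hin] at hisin
      exact Bool.false_ne_true hisin
    have : has_word_match_py_alt text query ≠ true := fun h => hno (halt.mp h)
    exact (Bool.not_eq_true _ |>.mp this).symm
  · rw [if_neg hin]
    have hloop := pvLoopA_iff text.toList query.toList (text.toList.length + 2) 0
      (by omega) (by omega)
    have hiff : (pvLoopA text.toList query.toList 0 (text.toList.length + 2) = true) ↔
        (has_word_match_py_alt text query = true) := by
      rw [hloop, halt]
      constructor
      · rintro ⟨i, -, hg⟩; exact ⟨i, hg⟩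
      · rintro ⟨i, hg⟩; exact ⟨i, Nat.zero_le i, hg⟩
    exact Bool.eq_iff_iff.mpr hiff

-- ===== VERDICT (by name: the statement is the Claim_ definition above) =====
theorem has_word_match_py_spec : Claim_equal_has_word_match_py := by
  intro text query _
  show has_word_match_py text query = has_word_match_py_alt text query
  exact pvKey text query
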